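-- pv_equiv track=rewrite | github.com/YoruLabs/Workflows-MCP | skills/apollo-clay-leads/scripts/score.py | check_location_match
-- ===== SOURCE A (Python) =====
-- from typing import Dict, Any, List, Tuple, Optional
--
-- def normalize(value: str) -> str:
--     """Normalize string for comparison."""
--     if not value:
--         return ""
--     return str(value).lower().strip()
--
-- def check_location_match(country: str, locations: List[str]) -> Tuple[bool, str]:
--     """Check if location matches ICP targets."""
--     if not country:
--         return False, None
--
--     country_lower = normalize(country)
--
--     # Common country aliases
--     country_aliases = {
--         "united states": ["united states", "usa", "us", "united states of america"],
--         "united kingdom": ["united kingdom", "uk", "great britain", "england"],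
--         "canada": ["canada", "ca"],
--     }
--
--     for target in locations:
--         target_lower = normalize(target)
--
--         # Direct match
--         if target_lower == country_lower:
--             return True, f"Location '{country}' matches ICP target"
--
--         # Alias match
--         for canonical, aliases in country_aliases.items():
--             if target_lower in aliases or canonical == target_lower:
--                 if country_lower in aliases or country_lower == canonical:
--                     return True, f"Location '{country}' matches ICP target '{target}'"
--
--     return False, None
-- ===== SOURCE B (Python) =====
-- def check_location_match(country, locations):
--     """Check if location matches ICP targets: one search pass, then classify the hit."""
--     if not country:
--         return False, None
--
--     cl = country.lower().strip()
--
--     country_aliases = {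
--         "united states": ["united states", "usa", "us", "united states of america"],
--         "united kingdom": ["united kingdom", "uk", "great britain", "england"],
--         "canada": ["canada", "ca"],
--     }
--
--     # Equivalence set: every member (aliases + canonical) of each group containing cl.
--     equiv = {x for canonical, aliases in country_aliases.items()
--              if cl in aliases or cl == canonical
--              for x in aliases + [canonical]}
--
--     def norm(t):
--         return t.lower().strip() if t else ""
--
--     hit = next((t for t in locations if norm(t) == cl or norm(t) in equiv), None)
--     if hit is None:
--         return False, None
--     if norm(hit) == cl:
--         return True, f"Location '{country}' matches ICP target"
--     return True, f"Location '{country}' matches ICP target '{hit}'"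
-- ===== Notes on version B (the rewrite author's own statement) =====
-- stated objective: faster
-- what changed: Replaces the nested per-target scan over alias groups with an equivalence set precomputed once by a comprehension, and replaces the returning loop with a single find-first-hit search whose hit is classified afterwards.
import Mathlib
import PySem

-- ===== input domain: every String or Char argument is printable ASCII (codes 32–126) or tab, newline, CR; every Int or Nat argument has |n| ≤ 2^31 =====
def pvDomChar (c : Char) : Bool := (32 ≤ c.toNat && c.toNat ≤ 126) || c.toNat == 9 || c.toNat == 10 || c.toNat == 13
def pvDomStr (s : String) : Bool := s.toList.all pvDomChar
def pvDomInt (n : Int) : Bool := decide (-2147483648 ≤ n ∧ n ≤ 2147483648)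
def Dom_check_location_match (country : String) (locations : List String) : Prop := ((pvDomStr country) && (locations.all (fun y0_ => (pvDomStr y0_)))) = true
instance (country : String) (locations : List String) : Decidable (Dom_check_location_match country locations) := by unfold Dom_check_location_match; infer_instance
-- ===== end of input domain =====

-- B precomputes the country's alias-equivalence set with one comprehension, then does a single
-- find-first-matching-target search and classifies the hit afterwards (objective: alternative).



-- ===== PORT A =====
-- A's helper normalize(value)
def pvNormalize (value : String) : String :=
  if value = "" then "" else PySem.Str.strip (PySem.Str.lower value)

def pvCountryAliases : List (String × List String) :=
  [("united states", ["united states", "usa", "us", "united states of america"]),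
   ("united kingdom", ["united kingdom", "uk", "great britain", "england"]),
   ("canada", ["canada", "ca"])]

-- A's inner for-loop over country_aliases.items(): returns True on the first group hit
def pvAliasHit (targetLower countryLower : String) : Bool :=
  pvCountryAliases.any (fun g =>
    (g.2.contains targetLower || g.1 == targetLower) &&
    (g.2.contains countryLower || countryLower == g.1))

-- A's outer for-loop over locations
def pvLoopA (country countryLower : String) : List String → Bool × Option String
  | [] => (false, none)
  | t :: ts =>
    let tl := pvNormalize t
    if tl == countryLower then
      (true, some ("Location '" ++ country ++ "' matches ICP target"))
    else if pvAliasHit tl countryLower then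
      (true, some ("Location '" ++ country ++ "' matches ICP target '" ++ t ++ "'"))
    else pvLoopA country countryLower ts

def check_location_match (country : String) (locations : List String) : Bool × Option String :=
  if country = "" then (false, none)
  else pvLoopA country (pvNormalize country) locations

-- ===== PORT B =====
-- B's equivalence set: {x  for (canonical, aliases) containing cl  for x in aliases + [canonical]}
def pvEquivB (cl : String) : PySem.Set String :=
  PySem.Set.ofList
    ((pvCountryAliases.filter (fun g => g.2.contains cl || cl == g.1)).flatMap
      (fun g => g.2 ++ [g.1]))

-- B's local helper norm(t)
def pvNormB (t : String) : String :=
  if t = "" then "" else PySem.Str.strip (PySem.Str.lower t)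

def check_location_match_alt (country : String) (locations : List String) : Bool × Option String :=
  if country = "" then (false, none)
  else
    let cl := PySem.Str.strip (PySem.Str.lower country)
    let equiv := pvEquivB cl
    -- hit = next((t for t in locations if norm(t) == cl or norm(t) in equiv), None)
    match locations.find? (fun t => pvNormB t == cl || PySem.Set.contains equiv (pvNormB t)) with
    | none => (false, none)
    | some t =>
      if pvNormB t == cl then (true, some ("Location '" ++ country ++ "' matches ICP target"))
      else (true, some ("Location '" ++ country ++ "' matches ICP target '" ++ t ++ "'"))

-- ===== PRECONDITION & SPEC =====
def Spec_check_location_match (country : String) (locations : List String) (out : Bool × Option String) : Prop := out = check_location_match_alt country locations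
instance (country : String) (locations : List String) (out : Bool × Option String) : Decidable (Spec_check_location_match country locations out) := by unfold Spec_check_location_match; infer_instance

-- ===== CLAIM =====
def Claim_equal_check_location_match : Prop := ∀ (country : String) (locations : List String), Dom_check_location_match country locations → Spec_check_location_match country locations (check_location_match country locations)

-- ===== LEMMAS AND PROOFS =====

-- A's nested group scan answers exactly membership in B's precomputed equivalence set.
theorem contains_equivB (tl cl : String) :
    PySem.Set.contains (pvEquivB cl) tl = pvAliasHit tl cl := by
  rw [Bool.eq_iff_iff]
  simp only [pvAliasHit, pvEquivB, PySem.Set.contains_eq_listContains, List.contains_eq_mem,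
    decide_eq_true_eq, PySem.Set.mem_ofList, List.mem_flatMap, List.mem_filter,
    List.any_eq_true, Bool.or_eq_true, Bool.and_eq_true, List.mem_append, List.mem_cons,
    List.not_mem_nil, or_false, beq_iff_eq]
  constructor
  · rintro ⟨g, ⟨hg, hp⟩, hm⟩
    refine ⟨g, hg, ?_, ?_⟩
    · rcases hm with hm | hm
      · exact Or.inl hm
      · exact Or.inr hm.symm
    · rcases hp with hp | hp
      · exact Or.inl hp
      · exact Or.inr hp
  · rintro ⟨g, hg, ht, hc⟩
    refine ⟨g, ⟨hg, ?_⟩, ?_⟩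
    · rcases hc with hc | hc
      · exact Or.inl hc
      · exact Or.inr hc
    · rcases ht with ht | ht
      · exact Or.inl ht
      · exact Or.inr ht.symm

-- A's returning loop equals B's find-then-classify pass.
theorem loopA_eq_findB (country cl : String) (ts : List String) :
    pvLoopA country cl ts =
      (match ts.find? (fun t => pvNormB t == cl || PySem.Set.contains (pvEquivB cl) (pvNormB t)) with
       | none => (false, none)
       | some t =>
         if pvNormB t == cl then (true, some ("Location '" ++ country ++ "' matches ICP target"))
         else (true, some ("Location '" ++ country ++ "' matches ICP target '" ++ t ++ "'"))) := by
  induction ts with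
  | nil => rfl
  | cons t ts ih =>
    have hn : pvNormalize t = pvNormB t := rfl
    have hc := contains_equivB (pvNormB t) cl
    by_cases h1 : pvNormB t == cl
    · rw [List.find?_cons_of_pos (h := by simp [h1])]
      simp [pvLoopA, hn, h1]
    · by_cases h2 : pvAliasHit (pvNormB t) cl
      · rw [List.find?_cons_of_pos (h := by simp only [hc]; simp [h1, h2])]
        simp [pvLoopA, hn, h1, h2]
      · rw [List.find?_cons_of_neg (h := by simp only [hc]; simp [h1, h2])]
        rw [show pvLoopA country cl (t :: ts) = pvLoopA country cl ts from by
          simp [pvLoopA, hn, h1, h2]]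
        exact ih

-- ===== VERDICT =====
theorem check_location_match_spec : Claim_equal_check_location_match := by
  intro country locations _
  unfold Spec_check_location_match check_location_match check_location_match_alt
  by_cases h : country = ""
  · simp [h]
  · simp only [h, if_false]
    simpa [pvNormalize, pvNormB, h] using
      loopA_eq_findB country (PySem.Str.strip (PySem.Str.lower country)) locations
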